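-- pv_equiv track=rewrite | github.com/DANU011/CodingTest | DANU/python/3613.py | cpp_to_java
-- ===== SOURCE A (Python) =====
-- def cpp_to_java(var_name):
--     error = "Error!"
--
--     converted_result = []
--
--     if "__" in var_name:
--         return error
--     if var_name[0] == "_" or var_name[-1] == "_":
--         return error
--     if not var_name.islower():
--         return error
--
--     for word in var_name.split("_"):
--         if not converted_result:
--             converted_result.append(word)
--         else:
--             converted_result.append(word.capitalize())
--
--     return "".join(converted_result)
-- ===== SOURCE B (Python) =====
-- def cpp_to_java(var_name):
--     if ("__" in var_name or var_name[0] == "_" or var_name[-1] == "_"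
--             or not var_name.islower()):
--         return "Error!"
--     out = []
--     capitalize_next = False
--     for ch in var_name:
--         if ch == "_":
--             capitalize_next = True
--         elif capitalize_next:
--             out.append(ch.upper())
--             capitalize_next = False
--         else:
--             out.append(ch)
--     return "".join(out)
-- ===== Notes on version B (the rewrite author's own statement) =====
-- stated objective: alternative
-- what changed: Replaced the split/capitalize/join pipeline over the underscore-separated word list by a single linear character scan with a capitalize-next flag, so no intermediate word list is built.
import Mathlib
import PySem

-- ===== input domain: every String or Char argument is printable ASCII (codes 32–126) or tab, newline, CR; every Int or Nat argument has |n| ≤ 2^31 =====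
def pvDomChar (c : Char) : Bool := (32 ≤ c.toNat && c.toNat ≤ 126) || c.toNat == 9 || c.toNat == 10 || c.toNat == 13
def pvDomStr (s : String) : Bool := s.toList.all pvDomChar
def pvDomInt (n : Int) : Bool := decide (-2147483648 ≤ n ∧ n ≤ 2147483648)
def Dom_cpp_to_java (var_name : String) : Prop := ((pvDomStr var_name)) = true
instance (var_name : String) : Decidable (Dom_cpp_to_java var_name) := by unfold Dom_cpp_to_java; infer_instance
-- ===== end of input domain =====

-- B replaces split('_')/capitalize/join with a single character scan keeping a capitalize-next flag (alternative decomposition, same cost).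


-- ===== PORT A =====
-- str.islower(): at least one cased char and no cased char uppercase; exact on the ASCII domain, where cased chars are exactly the letters
def pyStrIslower (cs : List Char) : Bool :=
  cs.any PySem.Chars.islower && cs.all (fun c => !PySem.Chars.isupper c)

-- word.capitalize(): first char title-cased, rest lowered; exact on ASCII (title-case = upperChar there)
def capChars : List Char → List Char
  | [] => []
  | c :: r => PySem.Chars.upperChar c :: r.map PySem.Chars.lowerChar

def cpp_to_java (var_name : String) : String :=
  let error := "Error!"
  if PySem.Str.isIn "__" var_name then error
  else if PySem.Str.pyGet? var_name 0 = some '_' ∨ PySem.Str.pyGet? var_name (-1) = some '_' then error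
  else if ¬ pyStrIslower var_name.toList then error
  else
    let converted := (PySem.Chars.splitOn var_name.toList ['_']).foldl
      (fun (acc : List (List Char)) w =>
        if acc.isEmpty then acc ++ [w] else acc ++ [capChars w]) []
    String.mk (PySem.Chars.join [] converted)

-- ===== PORT B =====
def cpp_to_java_alt (var_name : String) : String :=
  if PySem.Str.isIn "__" var_name ∨ PySem.Str.pyGet? var_name 0 = some '_' ∨
     PySem.Str.pyGet? var_name (-1) = some '_' ∨ ¬ pyStrIslower var_name.toList then "Error!"
  else
    let st := var_name.toList.foldl
      (fun (s : List Char × Bool) c =>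
        if c = '_' then (s.1, true)
        else if s.2 then (s.1 ++ [PySem.Chars.upperChar c], false)
        else (s.1 ++ [c], false)) ([], false)
    String.mk st.1

-- ===== PRECONDITION & SPEC =====
-- Pre_ excludes only the empty string, on which A raises IndexError at var_name[0].
def Pre_cpp_to_java (var_name : String) : Prop := var_name ≠ ""
instance (var_name : String) : Decidable (Pre_cpp_to_java var_name) := by unfold Pre_cpp_to_java; infer_instance
def pvWitness_cpp_to_java : String := "hello_world"

def Spec_cpp_to_java (var_name : String) (out : String) : Prop := out = cpp_to_java_alt var_name
instance (var_name : String) (out : String) : Decidable (Spec_cpp_to_java var_name out) := by unfold Spec_cpp_to_java; infer_instance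

-- ===== CLAIM (what is proved, stated in full; the proofs are below) =====
def Claim_equal_cpp_to_java : Prop := ∀ (var_name : String), Dom_cpp_to_java var_name → Pre_cpp_to_java var_name → Spec_cpp_to_java var_name (cpp_to_java var_name)

-- ===== LEMMAS AND PROOFS =====

-- A simple structural recursion equal to PySem.Chars.splitOn · ['_']
def splitU : List Char → List (List Char)
  | [] => [[]]
  | c :: cs =>
    if c = '_' then [] :: splitU cs
    else
      match splitU cs with
      | [] => [[c]]
      | w :: ws => (c :: w) :: ws

-- B's per-character recursion, accumulator removed
def bgo : List Char → Bool → List Char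
  | [], _ => []
  | c :: cs, cap =>
    if c = '_' then bgo cs true
    else (if cap then PySem.Chars.upperChar c else c) :: bgo cs false

theorem splitU_ne_nil (cs : List Char) : splitU cs ≠ [] := by
  cases cs with
  | nil => simp [splitU]
  | cons c cs =>
    simp only [splitU]
    split
    · simp
    · split <;> simp_all

theorem splitOn_go_eq (fuel : Nat) (cs cur : List Char) (acc : List (List Char))
    (h : cs.length < fuel) :
    PySem.Chars.splitOn.go ['_'] fuel cs cur acc =
      acc.reverse ++ (splitU cs).modifyHead (cur.reverse ++ ·) := by
  induction fuel generalizing cs cur acc with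
  | zero => omega
  | succ fuel ih =>
    cases cs with
    | nil => simp [PySem.Chars.splitOn.go, splitU]
    | cons c rest =>
      simp only [PySem.Chars.splitOn.go]
      by_cases hc : c = '_'
      · subst hc
        rw [if_pos (by simp [List.isPrefixOf])]
        rw [ih _ _ _ (by simpa using Nat.lt_of_succ_lt_succ h)]
        simp [splitU]
        cases splitU rest <;> simp
      · have hnp : List.isPrefixOf ['_'] (c :: rest) = false := by
          simp only [List.isPrefixOf, Bool.and_true, beq_eq_false_iff_ne, ne_eq]
          exact fun h => hc h.symm
        rw [if_neg (by rw [hnp]; exact Bool.false_ne_true)]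
        rw [ih _ _ _ (by simpa using Nat.lt_of_succ_lt_succ h)]
        simp only [splitU, if_neg hc]
        rcases hsp : splitU rest with _ | ⟨w, ws⟩
        · exact absurd hsp (splitU_ne_nil rest)
        · simp

theorem splitOn_eq_splitU (cs : List Char) :
    PySem.Chars.splitOn cs ['_'] = splitU cs := by
  show PySem.Chars.splitOn.go ['_'] (cs.length + 1) cs [] [] = _
  rw [splitOn_go_eq _ _ _ _ (by omega)]
  rcases h : splitU cs with _ | ⟨w, ws⟩
  · exact absurd h (splitU_ne_nil cs)
  · simp

-- every char of every word of splitU cs is a char of cs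
theorem mem_splitU (cs : List Char) : ∀ {w : List Char} {c : Char},
    w ∈ splitU cs → c ∈ w → c ∈ cs := by
  induction cs with
  | nil =>
    intro w c hw hc
    simp [splitU] at hw
    subst hw; simp at hc
  | cons x xs ih =>
    intro w c hw hc
    by_cases hx : x = '_'
    · simp only [splitU, if_pos hx, List.mem_cons] at hw
      rcases hw with hw | hw
      · subst hw; simp at hc
      · exact List.mem_cons_of_mem _ (ih hw hc)
    · simp only [splitU, if_neg hx] at hw
      rcases hsp : splitU xs with _ | ⟨v, vs⟩
      · exact absurd hsp (splitU_ne_nil xs)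
      · rw [hsp] at hw
        rcases List.mem_cons.mp hw with hw | hw
        · subst hw
          rcases List.mem_cons.mp hc with hc | hc
          · simp [hc]
          · exact List.mem_cons_of_mem _ (ih (hsp ▸ List.mem_cons_self) hc)
        · exact List.mem_cons_of_mem _ (ih (hsp ▸ List.mem_cons_of_mem _ hw) hc)

theorem flatten_intersperse_nil (l : List (List Char)) :
    (List.intersperse ([] : List Char) l).flatten = l.flatten := by
  induction l with
  | nil => simp
  | cons a l ih => cases l <;> simp_all [List.intersperse]

theorem lowerChar_of_not_upper {c : Char} (h : PySem.Chars.isupper c = false) :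
    PySem.Chars.lowerChar c = c := by
  simp [PySem.Chars.lowerChar, h]

-- the heart: under "no uppercase char", B's scan equals A's word-wise result
theorem bgo_eq_splitU (cs : List Char)
    (h : ∀ c ∈ cs, PySem.Chars.isupper c = false) :
    (∀ w ws, splitU cs = w :: ws →
        bgo cs false = w ++ (ws.map capChars).flatten) ∧
    bgo cs true = ((splitU cs).map capChars).flatten := by
  induction cs with
  | nil =>
    constructor
    · intro w ws hw
      simp [splitU] at hw
      simp [bgo, hw.1, hw.2]
    · simp [bgo, splitU, capChars]
  | cons c cs ih =>
    have hc := h c List.mem_cons_self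
    have hrest : ∀ x ∈ cs, PySem.Chars.isupper x = false :=
      fun x hx => h x (List.mem_cons_of_mem _ hx)
    obtain ⟨ih1, ih2⟩ := ih hrest
    rcases hsp : splitU cs with _ | ⟨w, ws⟩
    · exact absurd hsp (splitU_ne_nil cs)
    have ihw : bgo cs false = w ++ (ws.map capChars).flatten := ih1 w ws hsp
    have hwlow : w.map PySem.Chars.lowerChar = w := by
      have hall : ∀ x ∈ w, PySem.Chars.lowerChar x = id x := fun x hx =>
        lowerChar_of_not_upper (hrest x (mem_splitU cs (hsp ▸ List.mem_cons_self) hx))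
      rw [List.map_congr_left hall, List.map_id]
    by_cases hcu : c = '_'
    · subst hcu
      constructor
      · intro v vs hv
        simp only [splitU, hsp] at hv
        cases hv
        simp [bgo, ih2, hsp, capChars]
      · simp [bgo, ih2, hsp, splitU, capChars]
    · constructor
      · intro v vs hv
        simp only [splitU, if_neg hcu, hsp] at hv
        cases hv
        simp [bgo, if_neg hcu, ihw]
      · simp only [splitU, if_neg hcu, hsp]
        simp [bgo, if_neg hcu, ihw, capChars, hwlow]

-- A's foldl over the word list, once the accumulator is nonempty, appends capitalized words
theorem foldA_nonempty (ws : List (List Char)) (acc : List (List Char)) (hacc : acc ≠ []) :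
    ws.foldl (fun (acc : List (List Char)) w =>
        if acc.isEmpty then acc ++ [w] else acc ++ [capChars w]) acc
      = acc ++ ws.map capChars := by
  induction ws generalizing acc with
  | nil => simp
  | cons w ws ih =>
    have hne : acc.isEmpty = false := by simpa using hacc
    rw [List.foldl_cons, if_neg (by rw [hne]; exact Bool.false_ne_true)]
    rw [ih _ (by simp)]
    simp

-- B's foldl with accumulator equals bgo
theorem foldB_eq_bgo (cs : List Char) (acc : List Char) (cap : Bool) :
    (cs.foldl (fun (s : List Char × Bool) c =>
        if c = '_' then (s.1, true)
        else if s.2 then (s.1 ++ [PySem.Chars.upperChar c], false)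
        else (s.1 ++ [c], false)) (acc, cap)).1 = acc ++ bgo cs cap := by
  induction cs generalizing acc cap with
  | nil => simp [bgo]
  | cons c cs ih =>
    by_cases hcu : c = '_'
    · subst hcu; simp [bgo, ih]
    · cases cap <;> simp [bgo, hcu, ih]

-- both non-error bodies agree, given the islower guard
theorem bodies_eq (cs : List Char) (hlow : pyStrIslower cs = true) :
    String.mk (PySem.Chars.join [] ((PySem.Chars.splitOn cs ['_']).foldl
      (fun (acc : List (List Char)) w =>
        if acc.isEmpty then acc ++ [w] else acc ++ [capChars w]) [])) =
    String.mk ((cs.foldl (fun (s : List Char × Bool) c =>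
        if c = '_' then (s.1, true)
        else if s.2 then (s.1 ++ [PySem.Chars.upperChar c], false)
        else (s.1 ++ [c], false)) ([], false)).1) := by
  have hlow' : ∀ c ∈ cs, PySem.Chars.isupper c = false := by
    simp only [pyStrIslower, Bool.and_eq_true, List.all_eq_true] at hlow
    intro c hc
    simpa using hlow.2 c hc
  rcases hsp : splitU cs with _ | ⟨w, ws⟩
  · exact absurd hsp (splitU_ne_nil cs)
  rw [splitOn_eq_splitU, hsp, foldB_eq_bgo]
  rw [List.foldl_cons]
  rw [show (if ([] : List (List Char)).isEmpty then ([] : List (List Char)) ++ [w]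
        else [] ++ [capChars w]) = [w] by simp]
  rw [foldA_nonempty ws [w] (by simp)]
  rw [(bgo_eq_splitU cs hlow').1 w ws hsp]
  simp [PySem.Chars.join, List.intercalate, flatten_intersperse_nil]

-- ===== VERDICT (by name: the statement is the Claim_ definition above) =====
set_option maxHeartbeats 1600000 in
theorem cpp_to_java_spec : Claim_equal_cpp_to_java := by
  intro var_name hdom hpre
  unfold Spec_cpp_to_java cpp_to_java cpp_to_java_alt
  split_ifs with g1 g2 g3 g4 g5 g6 g7
  all_goals first
    | rfl
    | tauto
    | exact bodies_eq var_name.toList (by tauto)
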